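-- pv_equiv track=rewrite | github.com/RaysonSu/intcode | comp.py | find_replacements
-- ===== SOURCE A (Python) =====
-- OPCODE_DATA: list[str] = ["add", "mul", "inp", "out", "jfp", "jfz", "ltn", "ieq", "srb", "hlt", "lit"]
--
-- def compute_index(lines: list[str]) -> list[int]:
--     index = 0
--     indices = []
--     for row in lines:
--         indices.append(index)
--         first_token = row.split(" ")[0]
--
--         match first_token:
--             case "add" | "mul" | "ltn" | "ieq":
--                 index += 4
--             case "jfp" | "jfz":
--                 index += 3
--             case "inp" | "out" | "srb":
--                 index += 2
--             case "hlt" | "lit":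
--                 index += 1
--             case _:
--                 pass
--
--     return indices
--
-- def find_replacements(lines: list[str]) -> dict[str, int]:
--     ret = {}
--     indices = compute_index(lines)
--     for row, index in zip(lines, indices):
--         if any(row.startswith(operand) for operand in OPCODE_DATA):
--             continue
--
--         if "+" not in row:
--             ret[row[:-1]] = index
--         else:
--             ret[row[:row.index("+")]] = index + int(row[row.index("+"):-1])
--
--     return ret
-- ===== SOURCE B (Python) =====
-- OPCODE_DATA: list[str] = ["add", "mul", "inp", "out", "jfp", "jfz", "ltn", "ieq", "srb", "hlt", "lit"]
--
-- SIZES: dict[str, int] = {"add": 4, "mul": 4, "ltn": 4, "ieq": 4,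
--                          "jfp": 3, "jfz": 3,
--                          "inp": 2, "out": 2, "srb": 2,
--                          "hlt": 1, "lit": 1}
--
-- def find_replacements(lines: list[str]) -> dict[str, int]:
--     ret = {}
--     offset = 0
--     for row in lines:
--         if not any(row.startswith(operand) for operand in OPCODE_DATA):
--             idx = row.find("+")
--             if idx == -1:
--                 ret[row[:-1]] = offset
--             else:
--                 ret[row[:idx]] = offset + int(row[idx:-1])
--         offset += SIZES.get(row.split(" ")[0], 0)
--     return ret
-- ===== Notes on version B (the rewrite author's own statement) =====
-- stated objective: simpler
-- what changed: Fused A's two passes (compute_index building an indices list, then a zip loop) into a single loop that keeps one running integer offset and a constant size table, so no intermediate list and no zip.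
import Mathlib
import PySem

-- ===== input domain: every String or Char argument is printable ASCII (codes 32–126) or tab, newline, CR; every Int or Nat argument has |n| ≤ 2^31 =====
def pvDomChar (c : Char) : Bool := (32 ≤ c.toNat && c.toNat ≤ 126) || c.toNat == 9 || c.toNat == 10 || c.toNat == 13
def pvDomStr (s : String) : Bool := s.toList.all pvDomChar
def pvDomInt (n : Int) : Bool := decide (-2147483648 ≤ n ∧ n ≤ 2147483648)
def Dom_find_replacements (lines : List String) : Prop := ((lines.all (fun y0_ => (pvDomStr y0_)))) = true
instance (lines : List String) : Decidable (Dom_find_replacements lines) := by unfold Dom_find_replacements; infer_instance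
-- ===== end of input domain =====

-- B fuses A's two passes (indices list + zip loop) into one loop with a running offset; return value only.

-- ===== PORT A =====
def OPCODE_DATA : List String := ["add", "mul", "inp", "out", "jfp", "jfz", "ltn", "ieq", "srb", "hlt", "lit"]

-- the loop of compute_index: state (index, indices), one step per row
def computeIndexLoop (rows : List String) (index : Int) (indices : List Int) : List Int :=
  match rows with
  | [] => indices
  | row :: rest =>
    let indices' := indices ++ [index]
    let first_token := match PySem.Str.split? row " " with | some (t :: _) => t | _ => ""
    let index' :=
      if first_token == "add" || first_token == "mul" || first_token == "ltn" || first_token == "ieq" then index + 4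
      else if first_token == "jfp" || first_token == "jfz" then index + 3
      else if first_token == "inp" || first_token == "out" || first_token == "srb" then index + 2
      else if first_token == "hlt" || first_token == "lit" then index + 1
      else index
    computeIndexLoop rest index' indices'

def compute_index (lines : List String) : List Int := computeIndexLoop lines 0 []

-- row.index("+") is ported as Str.find: it is only reached under '"+" in row', where the two agree;
-- int(...) is ported as ofStr? with a 0 default — the none case (Python's ValueError) is excluded by Pre_
def find_replacements (lines : List String) : List (String × Int) :=
  let ret :=
    (lines.zip (compute_index lines)).foldl (fun (ret : PySem.Dict String Int) ri =>
      let row := ri.1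
      let index := ri.2
      if OPCODE_DATA.any (fun operand => PySem.Str.startswith row operand) then ret
      else if !(PySem.Str.isIn "+" row) then
        ret.insert (PySem.Str.slice row none (some (-1))) index
      else
        let i := PySem.Str.find row "+"
        ret.insert (PySem.Str.slice row none (some i))
          (index + (PySem.Int.ofStr? (PySem.Str.slice row (some i) (some (-1)))).getD 0))
      PySem.Dict.empty
  ret.items

-- ===== PORT B =====
def SIZES : PySem.Dict String Int :=
  PySem.Dict.ofList [("add", 4), ("mul", 4), ("ltn", 4), ("ieq", 4),
                     ("jfp", 3), ("jfz", 3),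
                     ("inp", 2), ("out", 2), ("srb", 2),
                     ("hlt", 1), ("lit", 1)]

def find_replacements_alt (lines : List String) : List (String × Int) :=
  let st :=
    lines.foldl (fun (st : PySem.Dict String Int × Int) row =>
      let ret := st.1
      let offset := st.2
      let ret' :=
        if !(OPCODE_DATA.any (fun operand => PySem.Str.startswith row operand)) then
          let idx := PySem.Str.find row "+"
          if idx == -1 then
            ret.insert (PySem.Str.slice row none (some (-1))) offset
          else
            ret.insert (PySem.Str.slice row none (some idx))
              (offset + (PySem.Int.ofStr? (PySem.Str.slice row (some idx) (some (-1)))).getD 0)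
        else ret
      let tok := match PySem.Str.split? row " " with | some (t :: _) => t | _ => ""
      (ret', offset + SIZES.getD tok 0))
      (PySem.Dict.empty, 0)
  st.1.items

-- ===== PRECONDITION & SPEC =====
-- Pre_ excludes exactly the inputs where Python A raises ValueError: a non-opcode row containing '+'
-- whose substring row[idx:-1] is not an int literal (B raises there too).
def Pre_find_replacements (lines : List String) : Prop :=
  ∀ row ∈ lines,
    (OPCODE_DATA.any (fun operand => PySem.Str.startswith row operand)) = false →
    PySem.Str.isIn "+" row = true →
    (PySem.Int.ofStr? (PySem.Str.slice row (some (PySem.Str.find row "+")) (some (-1)))).isSome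
instance (lines : List String) : Decidable (Pre_find_replacements lines) := by
  unfold Pre_find_replacements; infer_instance

def pvWitness_find_replacements : List String := ["start:", "add 1 2 3", "loop+4:", "jfz 0 start", "hlt"]

def Spec_find_replacements (lines : List String) (out : List (String × Int)) : Prop := out = find_replacements_alt lines
instance (lines : List String) (out : List (String × Int)) : Decidable (Spec_find_replacements lines out) := by unfold Spec_find_replacements; infer_instance

-- ===== CLAIM (what is proved, stated in full; the proofs are below) =====
def Claim_equal_find_replacements : Prop := ∀ (lines : List String), Dom_find_replacements lines → Pre_find_replacements lines → Spec_find_replacements lines (find_replacements lines)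

-- ===== LEMMAS AND PROOFS =====

-- A's per-row address increment, factored for the proofs
def stepA (row : String) : Int :=
  let t := match PySem.Str.split? row " " with | some (tok :: _) => tok | _ => ""
  if t == "add" || t == "mul" || t == "ltn" || t == "ieq" then 4
  else if t == "jfp" || t == "jfz" then 3
  else if t == "inp" || t == "out" || t == "srb" then 2
  else if t == "hlt" || t == "lit" then 1
  else 0

-- the indices list, written structurally
def scanIdx : Int → List String → List Int
  | _, [] => []
  | n, row :: rest => n :: scanIdx (n + stepA row) rest

lemma sizes_getD (t : String) :
    SIZES.getD t 0 =
      (if t == "add" || t == "mul" || t == "ltn" || t == "ieq" then 4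
       else if t == "jfp" || t == "jfz" then 3
       else if t == "inp" || t == "out" || t == "srb" then 2
       else if t == "hlt" || t == "lit" then 1
       else (0:Int)) := by
  by_cases h1 : t = "add"; · subst h1; decide
  by_cases h2 : t = "mul"; · subst h2; decide
  by_cases h3 : t = "ltn"; · subst h3; decide
  by_cases h4 : t = "ieq"; · subst h4; decide
  by_cases h5 : t = "jfp"; · subst h5; decide
  by_cases h6 : t = "jfz"; · subst h6; decide
  by_cases h7 : t = "inp"; · subst h7; decide
  by_cases h8 : t = "out"; · subst h8; decide
  by_cases h9 : t = "srb"; · subst h9; decide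
  by_cases h10 : t = "hlt"; · subst h10; decide
  by_cases h11 : t = "lit"; · subst h11; decide
  have hS : SIZES = PySem.Dict.mk [("add", 4), ("mul", 4), ("ltn", 4), ("ieq", 4),
                     ("jfp", 3), ("jfz", 3),
                     ("inp", 2), ("out", 2), ("srb", 2),
                     ("hlt", 1), ("lit", 1)] := by decide
  rw [hS]
  simp only [PySem.Dict.getD, PySem.Dict.get?_mk_cons, beq_iff_eq]
  simp [h1, h2, h3, h4, h5, h6, h7, h8, h9, h10, h11,
        Ne.symm h1, Ne.symm h2, Ne.symm h3, Ne.symm h4, Ne.symm h5, Ne.symm h6,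
        Ne.symm h7, Ne.symm h8, Ne.symm h9, Ne.symm h10, Ne.symm h11, PySem.Dict.get?]

lemma sizes_getD_eq_stepA (row : String) :
    SIZES.getD (match PySem.Str.split? row " " with | some (t :: _) => t | _ => "") 0 = stepA row :=
  sizes_getD _

lemma computeIndexLoop_eq (rows : List String) (n : Int) (acc : List Int) :
    computeIndexLoop rows n acc = acc ++ scanIdx n rows := by
  induction rows generalizing n acc with
  | nil => simp [computeIndexLoop, scanIdx]
  | cons row rest ih =>
    rw [computeIndexLoop]
    rw [ih, scanIdx]
    have : (let first_token := match PySem.Str.split? row " " with | some (t :: _) => t | _ => ""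
            if first_token == "add" || first_token == "mul" || first_token == "ltn" || first_token == "ieq" then n + 4
            else if first_token == "jfp" || first_token == "jfz" then n + 3
            else if first_token == "inp" || first_token == "out" || first_token == "srb" then n + 2
            else if first_token == "hlt" || first_token == "lit" then n + 1
            else n) = n + stepA row := by
      unfold stepA
      simp only
      split_ifs <;> omega
    rw [this]
    simp

-- one B step leaves the dict exactly as one A step does and advances the offset by stepA
lemma main_loop (rows : List String) (d : PySem.Dict String Int) (n : Int) :
    (rows.zip (scanIdx n rows)).foldl (fun (ret : PySem.Dict String Int) ri =>
      let row := ri.1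
      let index := ri.2
      if OPCODE_DATA.any (fun operand => PySem.Str.startswith row operand) then ret
      else if !(PySem.Str.isIn "+" row) then
        ret.insert (PySem.Str.slice row none (some (-1))) index
      else
        let i := PySem.Str.find row "+"
        ret.insert (PySem.Str.slice row none (some i))
          (index + (PySem.Int.ofStr? (PySem.Str.slice row (some i) (some (-1)))).getD 0)) d
    = (rows.foldl (fun (st : PySem.Dict String Int × Int) row =>
        let ret := st.1
        let offset := st.2
        let ret' :=
          if !(OPCODE_DATA.any (fun operand => PySem.Str.startswith row operand)) then
            let idx := PySem.Str.find row "+"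
            if idx == -1 then
              ret.insert (PySem.Str.slice row none (some (-1))) offset
            else
              ret.insert (PySem.Str.slice row none (some idx))
                (offset + (PySem.Int.ofStr? (PySem.Str.slice row (some idx) (some (-1)))).getD 0)
          else ret
        let tok := match PySem.Str.split? row " " with | some (t :: _) => t | _ => ""
        (ret', offset + SIZES.getD tok 0)) (d, n)).1 := by
  induction rows generalizing d n with
  | nil => simp [scanIdx]
  | cons row rest ih =>
    rw [scanIdx]
    simp only [List.zip_cons_cons, List.foldl_cons]
    rw [sizes_getD_eq_stepA row]
    rw [← ih]
    congr 1
    by_cases hop : (OPCODE_DATA.any (fun operand => PySem.Str.startswith row operand)) = true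
    · simp only [hop, Bool.not_true, Bool.false_eq_true, if_false, if_true]
    · simp only [Bool.not_eq_true] at hop
      by_cases hin : PySem.Str.isIn "+" row = true
      · have hfind : (PySem.Str.find row "+" == -1) = false := by
          simp only [beq_eq_false_iff_ne, ne_eq, PySem.Str.find_eq_neg_one_iff]
          rw [PySem.Str.isIn_iff_infix] at hin
          exact not_not_intro hin
        simp only [hop, hin, hfind, Bool.not_true, Bool.false_eq_true, if_false, if_true,
          Bool.not_false]
      · have hin' : PySem.Str.isIn "+" row = false := by
          simpa using hin
        have hfind : (PySem.Str.find row "+" == -1) = true := by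
          simp only [beq_iff_eq, PySem.Str.find_eq_neg_one_iff]
          intro hcontra
          rw [← PySem.Str.isIn_iff_infix] at hcontra
          exact hin hcontra
        simp only [hop, hin', hfind, Bool.false_eq_true, if_false, if_true, Bool.not_false]

-- ===== VERDICT (by name: the statement is the Claim_ definition above) =====
theorem find_replacements_spec : Claim_equal_find_replacements := by
  intro lines _ _
  unfold Spec_find_replacements find_replacements find_replacements_alt compute_index
  rw [computeIndexLoop_eq]
  simp only [List.nil_append]
  rw [main_loop]
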